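-- pv_equiv track=rewrite | github.com/Bacteriophage-project/Bacteriophage-Backend | utils/run resfinder.py | extract_accession_from_url
-- ===== SOURCE A (Python) =====
-- def extract_accession_from_url(url):
--     """Extract accession number from NCBI FTP URL."""
--     if not url:
--         return ''
--
--     # Handle different URL formats
--     if 'ftp.ncbi.nlm.nih.gov' in url or 'ncbi.nlm.nih.gov' in url:
--         # Extract from URL like https://ftp.ncbi.nlm.nih.gov/genomes/all/GCF/014/844/835/GCF_014844835.1_ASM1484483v1_genomic.fna.gz
--         parts = url.split('/')
--         # Sort parts by length (longest first) to prioritize longer accession patterns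
--         parts.sort(key=len, reverse=True)
--         for part in parts:
--             if part.startswith(('GCF_', 'GCA_', 'NZ_', 'CP', 'JA', 'JAI')):
--                 # Remove any file extensions
--                 accession = part.split('.')[0] if '.' in part else part
--                 return accession
--
--     # If it's already just an accession number
--     if url.startswith(('GCF_', 'GCA_', 'NZ_', 'CP', 'JA', 'JAI')):
--         return url.split('.')[0] if '.' in url else url
--
--     return url
-- ===== SOURCE B (Python) =====
-- def extract_accession_from_url(url):
--     """Extract accession number from NCBI FTP URL."""
--     if not url:
--         return ''
--
--     if 'ftp.ncbi.nlm.nih.gov' in url or 'ncbi.nlm.nih.gov' in url: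
--         # One pass in original order: keep the longest matching part
--         # (strict '>' so the earliest part wins ties, like the stable reverse sort).
--         best = None
--         for part in url.split('/'):
--             if part.startswith(('GCF_', 'GCA_', 'NZ_', 'CP', 'JA')) and \
--                (best is None or len(part) > len(best)):
--                 best = part
--         if best is not None:
--             return best.split('.')[0] if '.' in best else best
--
--     if url.startswith(('GCF_', 'GCA_', 'NZ_', 'CP', 'JA')):
--         return url.split('.')[0] if '.' in url else url
--
--     return url
-- ===== Notes on version B (the rewrite author's own statement) =====
-- stated objective: simpler
-- what changed: Inside the ncbi branch, A's stable length-descending sort of all URL parts followed by a first-match scan is replaced by a single pass over the parts in original order that keeps the current best matching part, replacing it only when a new matching part is strictly longer (same longest-then-earliest tie-break); the redundant 'JAI' prefix (subsumed by 'JA') is dropped.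
import Mathlib
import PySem

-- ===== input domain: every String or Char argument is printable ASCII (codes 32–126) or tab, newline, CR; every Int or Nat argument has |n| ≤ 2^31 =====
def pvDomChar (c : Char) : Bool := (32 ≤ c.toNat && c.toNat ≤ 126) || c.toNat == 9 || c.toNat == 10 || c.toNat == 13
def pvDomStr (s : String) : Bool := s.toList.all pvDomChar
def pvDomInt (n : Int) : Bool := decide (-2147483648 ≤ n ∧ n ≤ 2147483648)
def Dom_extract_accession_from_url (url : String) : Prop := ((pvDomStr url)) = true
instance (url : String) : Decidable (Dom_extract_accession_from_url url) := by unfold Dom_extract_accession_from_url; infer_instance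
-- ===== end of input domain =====

-- B replaces A's sort-then-scan (sort all URL parts by length, take the first accession-like
-- part) by a single pass over the parts in original order keeping the strictly-longest match;
-- objective: simpler (no sort), same results.

-- ===== PORT A =====
-- part.startswith(('GCF_', 'GCA_', 'NZ_', 'CP', 'JA', 'JAI'))
def aAcc (part : String) : Bool :=
  PySem.Str.startswith part "GCF_" || PySem.Str.startswith part "GCA_" ||
  PySem.Str.startswith part "NZ_" || PySem.Str.startswith part "CP" ||
  PySem.Str.startswith part "JA" || PySem.Str.startswith part "JAI"

-- the 'for part in parts: if …: return accession' loop (none = fell through)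
def aScan : List String → Option String
  | [] => none
  | part :: rest =>
    if aAcc part then
      some (if PySem.Str.isIn "." part then ((PySem.Str.split? part ".").getD []).headD "" else part)
    else aScan rest

def extract_accession_from_url (url : String) : String :=
  if url == "" then ""
  else
    let fromNcbi :=
      if PySem.Str.isIn "ftp.ncbi.nlm.nih.gov" url || PySem.Str.isIn "ncbi.nlm.nih.gov" url then
        aScan (PySem.List.sorted ((PySem.Str.split? url "/").getD []) PySem.Str.len true)
      else none
    match fromNcbi with
    | some acc => acc
    | none =>
      if aAcc url then
        (if PySem.Str.isIn "." url then ((PySem.Str.split? url ".").getD []).headD "" else url)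
      else url

-- ===== PORT B =====
def bAcc (part : String) : Bool :=
  PySem.Str.startswith part "GCF_" || PySem.Str.startswith part "GCA_" ||
  PySem.Str.startswith part "NZ_" || PySem.Str.startswith part "CP" ||
  PySem.Str.startswith part "JA"

def bStrip (s : String) : String :=
  if PySem.Str.isIn "." s then ((PySem.Str.split? s ".").getD []).headD "" else s

-- 'best is None or len(part) > len(best)'
def bBetter : Option String → String → Bool
  | none, _ => true
  | some b, part => decide (PySem.Str.len b < PySem.Str.len part)

-- the single pass keeping the strictly-longest matching part
def bLoop : List String → Option String → Option String
  | [], best => best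
  | part :: rest, best =>
      bLoop rest (if bAcc part && bBetter best part then some part else best)

def extract_accession_from_url_alt (url : String) : String :=
  if url == "" then ""
  else
    let fromNcbi :=
      if PySem.Str.isIn "ftp.ncbi.nlm.nih.gov" url || PySem.Str.isIn "ncbi.nlm.nih.gov" url then
        (bLoop ((PySem.Str.split? url "/").getD []) none).map bStrip
      else none
    match fromNcbi with
    | some acc => acc
    | none => if bAcc url then bStrip url else url

-- ===== PRECONDITION & SPEC =====
def Spec_extract_accession_from_url (url : String) (out : String) : Prop := out = extract_accession_from_url_alt url
instance (url : String) (out : String) : Decidable (Spec_extract_accession_from_url url out) := by unfold Spec_extract_accession_from_url; infer_instance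

-- ===== CLAIM (what is proved, stated in full; the proofs are below) =====
def Claim_equal_extract_accession_from_url : Prop := ∀ (url : String), Dom_extract_accession_from_url url → Spec_extract_accession_from_url url (extract_accession_from_url url)

-- ===== LEMMAS AND PROOFS =====

-- 'JAI' is redundant next to 'JA': the two prefix tests agree
lemma aAcc_eq_bAcc (s : String) : aAcc s = bAcc s := by
  unfold aAcc bAcc
  cases hJAI : PySem.Str.startswith s "JAI" with
  | false => rw [Bool.or_false]
  | true =>
    have hja : PySem.Str.startswith s "JA" = true := by
      rw [PySem.Str.startswith_eq, PySem.Chars.startswith_iff] at hJAI ⊢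
      exact List.IsPrefix.trans (by decide) hJAI
    rw [hja]
    simp

-- A's scan is find-first then extension-strip
lemma aScan_eq (ys : List String) : aScan ys = (ys.find? aAcc).map bStrip := by
  induction ys with
  | nil => simp [aScan]
  | cons y ys ih =>
    cases hy : aAcc y with
    | true => simp [aScan, hy, List.find?, bStrip]
    | false => simp [aScan, hy, List.find?, ih]

-- inserting into a length-descending list: the first match becomes x exactly when
-- P x holds and x is strictly longer than the previous first match
lemma find?_insertBy (P : String → Bool) (x : String) (ys : List String)
    (h : ys.Pairwise (fun a b => PySem.Str.len b ≤ PySem.Str.len a)) :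
    (PySem.List.insertBy (fun a b => decide (PySem.Str.len b < PySem.Str.len a)) x ys).find? P =
      if P x && bBetter (ys.find? P) x then some x else ys.find? P := by
  induction ys with
  | nil =>
    cases hx : P x <;> simp [PySem.List.insertBy, List.find?, hx, bBetter]
  | cons y ys ih =>
    rw [List.pairwise_cons] at h
    by_cases hlt : PySem.Str.len y < PySem.Str.len x
    · have hins : PySem.List.insertBy (fun a b => decide (PySem.Str.len b < PySem.Str.len a)) x (y :: ys)
          = x :: y :: ys := by
        simp only [PySem.List.insertBy, decide_eq_true hlt, if_true]
      rw [hins]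
      cases hx : P x with
      | false => simp [List.find?, hx]
      | true =>
        have hcond : bBetter ((y :: ys).find? P) x = true := by
          cases hf : (y :: ys).find? P with
          | none => rfl
          | some b =>
            have hb : b ∈ y :: ys := List.mem_of_find?_eq_some hf
            have hby : PySem.Str.len b ≤ PySem.Str.len y := by
              rcases List.mem_cons.mp hb with rfl | hb'
              · exact le_refl _
              · exact h.1 b hb'
            simp only [bBetter]
            exact decide_eq_true (lt_of_le_of_lt hby hlt)
        rw [Bool.true_and, hcond, if_pos rfl]
        exact List.find?_cons_of_pos hx
    · have hins : PySem.List.insertBy (fun a b => decide (PySem.Str.len b < PySem.Str.len a)) x (y :: ys)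
          = y :: PySem.List.insertBy (fun a b => decide (PySem.Str.len b < PySem.Str.len a)) x ys := by
        simp only [PySem.List.insertBy, decide_eq_false hlt, Bool.false_eq_true, if_false]
      rw [hins]
      cases hy : P y with
      | true =>
        have hf : List.find? P (y :: ys) = some y := List.find?_cons_of_pos hy
        rw [hf]
        simp only [bBetter, decide_eq_false hlt, Bool.and_false]
        rw [if_neg Bool.false_ne_true]
        exact List.find?_cons_of_pos hy
      | false =>
        rw [List.find?_cons_of_neg (by simp [hy]), List.find?_cons_of_neg (by simp [hy])]
        exact ih h.2

lemma sorted_rev_append_singleton (l : List String) (x : String) :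
    PySem.List.sorted (l ++ [x]) PySem.Str.len true =
      PySem.List.insertBy (fun a b => decide (PySem.Str.len b < PySem.Str.len a)) x
        (PySem.List.sorted l PySem.Str.len true) := by
  rw [PySem.List.sorted_rev_eq_foldl_insertBy, PySem.List.sorted_rev_eq_foldl_insertBy,
    List.foldl_append]
  rfl

lemma bLoop_append (l : List String) (x : String) (best : Option String) :
    bLoop (l ++ [x]) best =
      (if bAcc x && bBetter (bLoop l best) x then some x else bLoop l best) := by
  induction l generalizing best with
  | nil => simp [bLoop]
  | cons p l ih => simp [bLoop, ih]

lemma sorted_find?_eq_bLoop (l : List String) :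
    (PySem.List.sorted l PySem.Str.len true).find? bAcc = bLoop l none := by
  induction l using List.reverseRecOn with
  | nil => simp [PySem.List.sorted, bLoop]
  | append_singleton l x ih =>
    rw [sorted_rev_append_singleton, bLoop_append,
      find?_insertBy bAcc x _ (PySem.List.sorted_pairwise_rev l PySem.Str.len), ih]

lemma aAcc_funext : aAcc = bAcc := funext aAcc_eq_bAcc

-- ===== VERDICT (by name: the statement is the Claim_ definition above) =====
theorem extract_accession_from_url_spec : Claim_equal_extract_accession_from_url := by
  intro url _
  unfold Spec_extract_accession_from_url extract_accession_from_url extract_accession_from_url_alt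
  by_cases h0 : url == ""
  · simp [h0]
  · simp only [h0, if_false, Bool.false_eq_true]
    by_cases hn : (PySem.Str.isIn "ftp.ncbi.nlm.nih.gov" url || PySem.Str.isIn "ncbi.nlm.nih.gov" url) = true
    · simp only [hn, if_true]
      rw [aScan_eq, aAcc_funext, sorted_find?_eq_bLoop]
      cases bLoop ((PySem.Str.split? url "/").getD []) none with
      | none =>
        simp only [Option.map_none]
        rfl
      | some b => simp
    · simp only [Bool.eq_false_iff.mpr hn, if_false, Bool.false_eq_true]
      rw [aAcc_eq_bAcc]
      rfl
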